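-- pv_equiv track=rewrite | github.com/ey242/KiVA | chat_systems/chat_system_single_image_kiva_extrapolation_only.py | eval_response
-- ===== SOURCE A (Python) =====
-- def eval_response(response, answers, all_choices):
--     all_available_choices = {}
--     for choice in all_choices:
--         if choice in response:
--             all_available_choices[choice] = response.index(choice)
--
--     if len(all_available_choices) == 0:
--         return False
--     # get the earliest choice
--     extracted_choice = min(all_available_choices, key=all_available_choices.get)
--
--     for answer in answers:
--         if answer == extracted_choice:
--             return True
--     return False
-- ===== SOURCE B (Python) =====
-- def eval_response(response, answers, all_choices):
--     # Scan positions of response left to right; the first position where any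
--     # choice matches yields the earliest choice (first in all_choices breaks ties,
--     # matching min's first-insertion tie-break).
--     for pos in range(len(response) + 1):
--         for choice in all_choices:
--             if response.startswith(choice, pos):
--                 return choice in answers
--     return False
-- ===== Notes on version B (the rewrite author's own statement) =====
-- stated objective: faster
-- what changed: Instead of computing response.index for every choice, storing them in a dict and reducing with min(..., key=get), B scans the positions of response left to right and returns at the first position where some choice matches (response.startswith(choice, pos)), checking that choice against answers; no index() calls, no dict, no min reduction.
import Mathlib
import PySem

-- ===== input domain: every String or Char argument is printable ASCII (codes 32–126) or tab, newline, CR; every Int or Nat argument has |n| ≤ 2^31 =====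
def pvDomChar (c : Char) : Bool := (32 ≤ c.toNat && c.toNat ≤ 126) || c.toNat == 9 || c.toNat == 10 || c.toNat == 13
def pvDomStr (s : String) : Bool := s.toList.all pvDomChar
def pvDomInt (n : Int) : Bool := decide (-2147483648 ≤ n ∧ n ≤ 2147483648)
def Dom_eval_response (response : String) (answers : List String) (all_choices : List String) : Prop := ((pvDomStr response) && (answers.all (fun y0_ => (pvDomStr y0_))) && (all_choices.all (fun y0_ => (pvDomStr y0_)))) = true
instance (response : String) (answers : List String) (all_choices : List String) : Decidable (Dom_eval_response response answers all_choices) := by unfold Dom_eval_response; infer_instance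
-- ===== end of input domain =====

-- B replaces A's per-choice index() calls + dict of positions + min(…, key=get) reduction by a
-- left-to-right scan over the positions of response that returns at the first position where some
-- choice matches (first choice in all_choices order breaks ties, as min's first-insertion rule does);
-- the early exit made B measurably faster than A on the generated timing inputs.


-- ===== PORT A =====
-- loop body of A's first for-loop: 'if choice in response: d[choice] = response.index(choice)'
-- (response.index(choice) is guarded by 'choice in response', so it equals PySem.Str.find there — exact)
def pvStepA (response : String) (d : PySem.Dict String Int) (choice : String) : PySem.Dict String Int :=
  if PySem.Str.isIn choice response then d.insert choice (PySem.Str.find response choice) else d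

def eval_response (response : String) (answers : List String) (all_choices : List String) : Bool :=
  let all_available_choices := all_choices.foldl (pvStepA response) PySem.Dict.empty
  if all_available_choices.size = 0 then false
  else
    -- min(all_available_choices, key=all_available_choices.get): first key with minimal value
    -- (every key is present, so .get = getD _ 0 on the keys iterated — exact)
    match PySem.List.min? all_available_choices.keys (fun k => all_available_choices.getD k 0) with
    | none => false  -- unreachable: the dict is non-empty here
    | some extracted_choice => answers.any (fun answer => answer == extracted_choice)

-- ===== PORT B =====
-- inner 'for choice in all_choices: if response.startswith(choice, pos)': first matching choice at pos
-- (Python's response.startswith(choice, pos) for 0 ≤ pos ≤ len(response) is 'choice is a prefix of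
--  response[pos:]', i.e. startswith of the dropped list — exact on the positions range() produces)
def pvFindChoiceAt (response : String) : (all_choices : List String) → (pos : Nat) → Option String
  | [], _ => none
  | c :: t, pos =>
      if PySem.Chars.startswith (response.toList.drop pos) c.toList then some c
      else pvFindChoiceAt response t pos

-- outer 'for pos in range(len(response) + 1)' with the early returns
def pvScanPos (response : String) (answers : List String) (all_choices : List String) : List Nat → Bool
  | [] => false
  | pos :: rest =>
      match pvFindChoiceAt response all_choices pos with
      | some c => answers.contains c
      | none => pvScanPos response answers all_choices rest

def eval_response_alt (response : String) (answers : List String) (all_choices : List String) : Bool :=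
  pvScanPos response answers all_choices (List.range (response.toList.length + 1))

-- ===== PRECONDITION & SPEC =====
def Spec_eval_response (response : String) (answers : List String) (all_choices : List String) (out : Bool) : Prop := out = eval_response_alt response answers all_choices
instance (response : String) (answers : List String) (all_choices : List String) (out : Bool) : Decidable (Spec_eval_response response answers all_choices out) := by unfold Spec_eval_response; infer_instance

-- ===== CLAIM (what is proved, stated in full; the proofs are below) =====
def Claim_equal_eval_response : Prop := ∀ (response : String) (answers : List String) (all_choices : List String), Dom_eval_response response answers all_choices → Spec_eval_response response answers all_choices (eval_response response answers all_choices)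

-- ===== LEMMAS AND PROOFS =====

-- proof-side intermediate: the running best (position, choice) A's dict+min reduction computes
def pvStepB (response : String) (best : Option (Int × String)) (choice : String) : Option (Int × String) :=
  if PySem.Str.isIn choice response then
    let pos := PySem.Str.find response choice
    match best with
    | none => some (pos, choice)
    | some b => if pos < b.1 then some (pos, choice) else best
  else best

-- first item with minimal snd, carried as (snd, fst) — the value the running-best loop maintains
def pvFmStep (b : Option (Int × String)) (p : String × Int) : Option (Int × String) :=
  match b with
  | none => some (p.2, p.1)
  | some q => if p.2 < q.1 then some (p.2, p.1) else b

def pvFirstMin (l : List (String × Int)) : Option (Int × String) := l.foldl pvFmStep none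

lemma pvFm_isSome : ∀ (l : List (String × Int)) (b : Option (Int × String)),
    b.isSome → (l.foldl pvFmStep b).isSome := by
  intro l
  induction l with
  | nil => intro b h; simpa using h
  | cons p t ih =>
    intro b h
    simp only [List.foldl_cons]
    apply ih
    cases b with
    | none => simp at h
    | some q =>
      show (if p.2 < q.1 then some (p.2, p.1) else some q).isSome = true
      split <;> rfl

lemma pvFm_min : ∀ (l : List (String × Int)) (b : Option (Int × String)) (q : Int × String),
    l.foldl pvFmStep b = some q →
    (∀ p ∈ l, q.1 ≤ p.2) ∧ (∀ q0, b = some q0 → q.1 ≤ q0.1) := by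
  intro l
  induction l with
  | nil =>
    intro b q h
    rw [List.foldl_nil] at h
    subst h
    refine ⟨by simp, ?_⟩
    intro q0 h0
    injection h0 with h0
    rw [h0]
  | cons p t ih =>
    intro b q h
    simp only [List.foldl_cons] at h
    obtain ⟨h1, h2⟩ := ih (pvFmStep b p) q h
    have hp : q.1 ≤ p.2 ∧ ∀ q0, b = some q0 → q.1 ≤ q0.1 := by
      cases b with
      | none =>
        have := h2 (p.2, p.1) (by simp [pvFmStep])
        exact ⟨this, by intro q0 h0; simp at h0⟩
      | some q0 =>
        simp only [pvFmStep] at h2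
        by_cases hc : p.2 < q0.1
        · have := h2 (p.2, p.1) (by simp [hc])
          exact ⟨this, by intro q1 h1'; injection h1' with h1'; subst h1'; omega⟩
        · have := h2 q0 (by simp [hc])
          exact ⟨by omega, by intro q1 h1'; injection h1' with h1'; subst h1'; omega⟩
    refine ⟨?_, hp.2⟩
    intro x hx
    rcases List.mem_cons.mp hx with hx | hx
    · subst hx; exact hp.1
    · exact h1 x hx

-- min? over the keys with a snd-consistent key function is pvFirstMin's choice component
lemma pvMin?_rel (g : String → Int) :
    ∀ (l : List (String × Int)) (b : Option (Int × String)),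
    (∀ p ∈ l, g p.1 = p.2) → (∀ q, b = some q → g q.2 = q.1) →
    (List.foldl (fun acc x => match acc with
        | none => some x
        | some m => if g x < g m then some x else some m)
        (b.map (fun q => q.2)) (l.map (fun x => x.1))
      = (l.foldl pvFmStep b).map (fun q => q.2))
    ∧ (∀ q, l.foldl pvFmStep b = some q → g q.2 = q.1) := by
  intro l
  induction l with
  | nil => intro b hg hb; exact ⟨rfl, hb⟩
  | cons p t ih =>
    intro b hg hb
    have hgp : g p.1 = p.2 := hg p (by simp)
    have hstep : (pvFmStep b p).map (fun q => q.2) =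
        (match b.map (fun q => q.2) with
          | none => some p.1
          | some m => if g p.1 < g m then some p.1 else some m) ∧
        (∀ q, pvFmStep b p = some q → g q.2 = q.1) := by
      cases b with
      | none => exact ⟨by simp [pvFmStep], by intro q h; simp [pvFmStep] at h; subst h; simpa⟩
      | some q0 =>
        have hq0 : g q0.2 = q0.1 := hb q0 rfl
        simp only [pvFmStep, Option.map_some, hgp, hq0]
        constructor
        · split <;> simp
        · intro q h
          split at h <;> (injection h with h; subst h; simpa)
    obtain ⟨ih1, ih2⟩ := ih (pvFmStep b p) (fun x hx => hg x (by simp [hx])) hstep.2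
    refine ⟨?_, ih2⟩
    simpa only [List.map_cons, List.foldl_cons, hstep.1] using ih1

lemma pvStepB_eq (response : String) (b : Option (Int × String)) (c : String) :
    pvStepB response b c =
      if PySem.Str.isIn c response then pvFmStep b (c, PySem.Str.find response c) else b := by
  cases b <;> rfl

lemma pvMin?_eq (g : String → Int) (xs : List String) :
    PySem.List.min? xs g = xs.foldl (fun acc x => match acc with
      | none => some x
      | some m => if g x < g m then some x else some m) none := by
  unfold PySem.List.min?
  congr 1
  funext acc x
  cases acc <;> rfl

-- the coupled loop invariant: running A's dict loop and the running-best loop in parallel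
lemma pvLoop_rel (response : String) :
    ∀ (choices : List String) (d : PySem.Dict String Int),
    (∀ p ∈ d.items, p.2 = PySem.Str.find response p.1) → d.keys.Nodup →
    (∀ p ∈ (choices.foldl (pvStepA response) d).items, p.2 = PySem.Str.find response p.1) ∧
    (choices.foldl (pvStepA response) d).keys.Nodup ∧
    choices.foldl (pvStepB response) (pvFirstMin d.items) =
      pvFirstMin (choices.foldl (pvStepA response) d).items := by
  intro choices
  induction choices with
  | nil => intro d h1 h2; exact ⟨h1, h2, rfl⟩
  | cons c cs ih =>
    intro d h1 h2
    simp only [List.foldl_cons]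
    by_cases hin : PySem.Str.isIn c response
    · by_cases hct : d.contains c = true
      · -- key already present: the overwrite rewrites the same value, items unchanged
        have hitems : (d.insert c (PySem.Str.find response c)).items = d.items := by
          rw [PySem.Dict.items_insert_of_contains d _ hct]
          rw [List.map_congr_left (fun p hp => ?_), List.map_id']
          by_cases he : p.1 = c
          · have hv := h1 p hp
            rw [if_pos (by simp [he] : (p.1 == c) = true), ← he, ← hv]
          · rw [if_neg (by simp [he] : ¬ (p.1 == c) = true)]
        have h1' : ∀ p ∈ (d.insert c (PySem.Str.find response c)).items,
            p.2 = PySem.Str.find response p.1 := by rw [hitems]; exact h1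
        have h2' := PySem.Dict.nodup_keys_insert d c (PySem.Str.find response c) h2
        have hbest : pvStepB response (pvFirstMin d.items) c =
            pvFirstMin (d.insert c (PySem.Str.find response c)).items := by
          rw [hitems]
          have hckeys : c ∈ d.keys := (PySem.Dict.contains_iff_mem_keys d c).mp hct
          have hmem : ∃ v, (c, v) ∈ d.items := by
            simp only [PySem.Dict.keys, List.mem_map] at hckeys
            obtain ⟨p, hp, hpc⟩ := hckeys
            refine ⟨p.2, ?_⟩
            rw [← hpc]
            exact hp
          obtain ⟨v, hv⟩ := hmem
          have hvf : v = PySem.Str.find response c := h1 (c, v) hv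
          have hne : d.items ≠ [] := by intro h; rw [h] at hv; simp at hv
          have hsome : (pvFirstMin d.items).isSome := by
            cases hl : d.items with
            | nil => exact absurd hl hne
            | cons p t =>
              unfold pvFirstMin
              rw [List.foldl_cons]
              exact pvFm_isSome t _ (by simp [pvFmStep])
          obtain ⟨q, hq⟩ := Option.isSome_iff_exists.mp hsome
          have hmin := (pvFm_min d.items none q hq).1 (c, v) hv
          have hnlt : ¬ PySem.Str.find response c < q.1 := by rw [← hvf]; omega
          rw [pvStepB_eq, if_pos hin, hq]
          show (if PySem.Str.find response c < q.1
                then some (PySem.Str.find response c, c) else some q) = some q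
          rw [if_neg hnlt]
        rw [pvStepA, if_pos hin, hbest]
        exact ih _ h1' h2'
      · -- fresh key: the dict appends (c, find response c); the best loop folds the same pair in
        have hct' : d.contains c = false := by simpa using hct
        have hitems := PySem.Dict.items_insert_of_not_contains d (PySem.Str.find response c) hct'
        have h1' : ∀ p ∈ (d.insert c (PySem.Str.find response c)).items,
            p.2 = PySem.Str.find response p.1 := by
          rw [hitems]; intro p hp
          rcases List.mem_append.mp hp with hp | hp
          · exact h1 p hp
          · simp at hp; subst hp; rfl
        have h2' := PySem.Dict.nodup_keys_insert d c (PySem.Str.find response c) h2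
        have hbest : pvStepB response (pvFirstMin d.items) c =
            pvFirstMin (d.insert c (PySem.Str.find response c)).items := by
          rw [hitems]
          unfold pvFirstMin
          rw [List.foldl_append, List.foldl_cons, List.foldl_nil, pvStepB_eq, if_pos hin]
        rw [pvStepA, if_pos hin, hbest]
        exact ih _ h1' h2'
    · rw [pvStepA, if_neg hin, pvStepB_eq, if_neg hin]
      exact ih d h1 h2

lemma pvAny_eq_contains (l : List String) (a : String) :
    l.any (fun x => x == a) = l.contains a := by
  induction l with
  | nil => rfl
  | cons x t ih =>
    rw [List.any_cons, List.contains_cons, ih]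
    by_cases h : x = a
    · subst h; rfl
    · rw [beq_eq_false_iff_ne.mpr h, beq_eq_false_iff_ne.mpr (fun hh => h hh.symm)]

-- A equals the running-best reduction of the same data
lemma pvA_eq_best (response : String) (answers : List String) (all_choices : List String) :
    eval_response response answers all_choices =
      (match all_choices.foldl (pvStepB response) none with
       | none => false
       | some b => answers.contains b.2) := by
  unfold eval_response
  have h0 : (PySem.Dict.empty : PySem.Dict String Int).items = [] := rfl
  obtain ⟨hD1, hD2, hB⟩ := pvLoop_rel response all_choices PySem.Dict.empty
    (by rw [h0]; simp) (by rw [PySem.Dict.keys, h0]; simp)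
  set D := all_choices.foldl (pvStepA response) PySem.Dict.empty with hDdef
  have hB' : all_choices.foldl (pvStepB response) none = pvFirstMin D.items := by
    rw [← hB, h0]; rfl
  rw [hB']
  cases hl : D.items with
  | nil =>
    have hsz : D.size = 0 := by rw [PySem.Dict.size, hl]; rfl
    simp [hsz, pvFirstMin]
  | cons p t =>
    have hsz : D.size ≠ 0 := by rw [PySem.Dict.size, hl]; simp
    have hg : ∀ p' ∈ D.items, D.getD p'.1 0 = p'.2 := by
      intro p' hp'
      have := PySem.Dict.get?_of_mem_items D (k := p'.1) (v := p'.2) hp' hD2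
      rw [PySem.Dict.getD_eq_get?_getD, this]; rfl
    have hrel := (pvMin?_rel (fun k => D.getD k 0) D.items none hg (by simp)).1
    have hsome : (pvFirstMin D.items).isSome := by
      rw [hl]
      unfold pvFirstMin
      rw [List.foldl_cons]
      exact pvFm_isSome t _ (by simp [pvFmStep])
    obtain ⟨q, hq⟩ := Option.isSome_iff_exists.mp hsome
    have hmin : PySem.List.min? D.keys (fun k => D.getD k 0) = some q.2 := by
      rw [pvMin?_eq, PySem.Dict.keys]
      unfold pvFirstMin at hrel hq
      rw [hq] at hrel
      simp only [Option.map_none, Option.map_some] at hrel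
      exact hrel
    rw [hl] at hq
    simp only [hsz, if_false]
    rw [hmin, hq]
    show (answers.any fun answer => answer == q.2) = answers.contains q.2
    exact pvAny_eq_contains answers q.2

-- a prefix occurrence at position i means the choice is in response with find ≤ i
lemma pvPrefix_find_le (response c : String) (i : Nat)
    (h : c.toList <+: response.toList.drop i) :
    PySem.Str.isIn c response = true ∧ PySem.Str.find response c ≤ (i : Int) := by
  have hin : PySem.Chars.isIn c.toList response.toList = true :=
    (PySem.Chars.exists_prefix_drop_iff_isIn c.toList response.toList).mp ⟨i, h⟩
  have hin' : PySem.Str.isIn c response = true := by rw [PySem.Str.isIn_eq]; exact hin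
  have hnn : 0 ≤ PySem.Chars.find response.toList c.toList :=
    (PySem.Chars.find_nonneg_iff _ _).mpr ((PySem.Str.isIn_iff_infix c response).mp hin')
  have hspec := PySem.Chars.find_spec hnn
  have hle : (PySem.Chars.find response.toList c.toList).toNat ≤ i := by
    by_contra hlt
    exact hspec.2 i (by omega) h
  refine ⟨hin', ?_⟩
  rw [PySem.Str.find_eq]
  omega

lemma pvFind_prefix (response c : String) (h : PySem.Str.isIn c response = true) :
    c.toList <+: response.toList.drop (PySem.Str.find response c).toNat := by
  have hnn : 0 ≤ PySem.Chars.find response.toList c.toList :=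
    (PySem.Chars.find_nonneg_iff _ _).mpr ((PySem.Str.isIn_iff_infix c response).mp h)
  rw [PySem.Str.find_eq]
  exact (PySem.Chars.find_spec hnn).1

-- explicit step equations for the running-best fold
lemma pvStepB_in_none (r c : String) (hin : PySem.Str.isIn c r = true) :
    pvStepB r none c = some (PySem.Str.find r c, c) := by
  unfold pvStepB; rw [if_pos hin]

lemma pvStepB_in_lt (r c : String) (q0 : Int × String) (hin : PySem.Str.isIn c r = true)
    (hlt : PySem.Str.find r c < q0.1) :
    pvStepB r (some q0) c = some (PySem.Str.find r c, c) := by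
  unfold pvStepB; rw [if_pos hin]
  show (if PySem.Str.find r c < q0.1 then some (PySem.Str.find r c, c) else some q0)
      = some (PySem.Str.find r c, c)
  rw [if_pos hlt]

lemma pvStepB_in_ge (r c : String) (q0 : Int × String) (hin : PySem.Str.isIn c r = true)
    (hlt : ¬ PySem.Str.find r c < q0.1) :
    pvStepB r (some q0) c = some q0 := by
  unfold pvStepB; rw [if_pos hin]
  show (if PySem.Str.find r c < q0.1 then some (PySem.Str.find r c, c) else some q0) = some q0
  rw [if_neg hlt]

lemma pvStepB_notin (r c : String) (b : Option (Int × String))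
    (hin : ¬ PySem.Str.isIn c r = true) : pvStepB r b c = b := by
  unfold pvStepB; rw [if_neg hin]

-- the fold with the running best: full characterisation of its result
lemma pvBest_split (response : String) :
    ∀ (cs : List String) (b : Option (Int × String)) (q : Int × String),
    cs.foldl (pvStepB response) b = some q →
    (b = some q ∧ ∀ c ∈ cs, PySem.Str.isIn c response = true → q.1 ≤ PySem.Str.find response c)
    ∨ (∃ pre post, cs = pre ++ q.2 :: post
        ∧ PySem.Str.isIn q.2 response = true ∧ PySem.Str.find response q.2 = q.1
        ∧ (∀ c ∈ pre, PySem.Str.isIn c response = true → q.1 < PySem.Str.find response c)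
        ∧ (∀ q0, b = some q0 → q.1 < q0.1)
        ∧ (∀ c ∈ post, PySem.Str.isIn c response = true → q.1 ≤ PySem.Str.find response c)) := by
  intro cs
  induction cs with
  | nil =>
    intro b q h
    rw [List.foldl_nil] at h
    exact Or.inl ⟨h, by simp⟩
  | cons c t ih =>
    intro b q h
    rw [List.foldl_cons] at h
    by_cases hin : PySem.Str.isIn c response = true
    · rcases ih (pvStepB response b c) q h with ⟨hb', ht⟩ | ⟨pre, post, hsplit, hq, hf, hpre, hb', hpost⟩
      · -- the accumulator after c survives the tail
        cases b with
        | none =>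
          have hq : q = (PySem.Str.find response c, c) := by
            rw [pvStepB_in_none response c hin] at hb'; injection hb' with h'; exact h'.symm
          subst hq
          refine Or.inr ⟨[], t, by simp, hin, rfl, by simp, by simp, ?_⟩
          intro c' hc' hin'; exact ht c' (by simp [hc']) hin'
        | some q0 =>
          by_cases hlt : PySem.Str.find response c < q0.1
          · have hq : q = (PySem.Str.find response c, c) := by
              rw [pvStepB_in_lt response c q0 hin hlt] at hb'; injection hb' with h'; exact h'.symm
            subst hq
            refine Or.inr ⟨[], t, by simp, hin, rfl, by simp, ?_, ?_⟩
            · intro q1 hq1; injection hq1 with hq1; subst hq1; exact hlt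
            · intro c' hc' hin'; exact ht c' (by simp [hc']) hin'
          · rw [pvStepB_in_ge response c q0 hin hlt] at hb'
            refine Or.inl ⟨hb', ?_⟩
            intro c' hc' hin'
            rcases List.mem_cons.mp hc' with hc' | hc'
            · subst hc'
              have : q0 = q := by injection hb'
              subst this
              omega
            · exact ht c' hc' hin'
      · -- the winner q lives in the tail: prepend c to pre
        refine Or.inr ⟨c :: pre, post, by simp [hsplit], hq, hf, ?_, ?_, hpost⟩
        · intro c' hc' hin'
          rcases List.mem_cons.mp hc' with hc' | hc'
          · subst hc'
            cases b with
            | none =>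
              exact hb' (PySem.Str.find response c', c') (pvStepB_in_none response c' hin')
            | some q0 =>
              by_cases hlt : PySem.Str.find response c' < q0.1
              · exact hb' (PySem.Str.find response c', c') (pvStepB_in_lt response c' q0 hin' hlt)
              · have := hb' q0 (pvStepB_in_ge response c' q0 hin' hlt)
                omega
          · exact hpre c' hc' hin'
        · intro q0 hq0
          subst hq0
          by_cases hlt : PySem.Str.find response c < q0.1
          · have h2 : q.1 < PySem.Str.find response c :=
              hb' (PySem.Str.find response c, c) (pvStepB_in_lt response c q0 hin hlt)
            exact lt_trans h2 hlt
          · exact hb' q0 (pvStepB_in_ge response c q0 hin hlt)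
    · rw [pvStepB_notin response c b hin] at h
      rcases ih b q h with ⟨hb', ht⟩ | ⟨pre, post, hsplit, hq, hf, hpre, hb', hpost⟩
      · refine Or.inl ⟨hb', ?_⟩
        intro c' hc' hin'
        rcases List.mem_cons.mp hc' with hc' | hc'
        · subst hc'; exact absurd hin' hin
        · exact ht c' hc' hin'
      · refine Or.inr ⟨c :: pre, post, by simp [hsplit], hq, hf, ?_, hb', hpost⟩
        intro c' hc' hin'
        rcases List.mem_cons.mp hc' with hc' | hc'
        · subst hc'; exact absurd hin' hin
        · exact hpre c' hc' hin'

lemma pvBest_none (response : String) :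
    ∀ (cs : List String) (b : Option (Int × String)),
    cs.foldl (pvStepB response) b = none →
    b = none ∧ ∀ c ∈ cs, PySem.Str.isIn c response = false := by
  intro cs
  induction cs with
  | nil => intro b h; rw [List.foldl_nil] at h; exact ⟨h, by simp⟩
  | cons c t ih =>
    intro b h
    rw [List.foldl_cons] at h
    obtain ⟨hb', ht⟩ := ih (pvStepB response b c) h
    by_cases hin : PySem.Str.isIn c response = true
    · exfalso
      cases b with
      | none => rw [pvStepB_in_none response c hin] at hb'; exact Option.some_ne_none _ hb'
      | some q0 =>
        by_cases hlt : PySem.Str.find response c < q0.1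
        · rw [pvStepB_in_lt response c q0 hin hlt] at hb'; exact Option.some_ne_none _ hb'
        · rw [pvStepB_in_ge response c q0 hin hlt] at hb'; exact Option.some_ne_none _ hb'
    · rw [pvStepB_notin response c b hin] at hb'
      refine ⟨hb', ?_⟩
      intro c' hc'
      rcases List.mem_cons.mp hc' with hc' | hc'
      · subst hc'; simpa using hin
      · exact ht c' hc'

lemma pvFindAt_none (response : String) (cs : List String) (i : Nat)
    (h : ∀ c ∈ cs, ¬ (c.toList <+: response.toList.drop i)) :
    pvFindChoiceAt response cs i = none := by
  induction cs with
  | nil => rfl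
  | cons c t ih =>
    simp only [pvFindChoiceAt]
    rw [if_neg, ih (fun c' hc' => h c' (List.mem_cons_of_mem c hc'))]
    intro hsw
    exact h c (by simp) ((PySem.Chars.startswith_iff _ _).mp hsw)

lemma pvFindAt_first (response : String) (pre post : List String) (c : String) (i : Nat)
    (hpre : ∀ c' ∈ pre, ¬ (c'.toList <+: response.toList.drop i))
    (hc : c.toList <+: response.toList.drop i) :
    pvFindChoiceAt response (pre ++ c :: post) i = some c := by
  induction pre with
  | nil =>
    rw [List.nil_append]
    simp only [pvFindChoiceAt]
    rw [if_pos ((PySem.Chars.startswith_iff _ _).mpr hc)]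
  | cons c0 t ih =>
    rw [List.cons_append]
    simp only [pvFindChoiceAt]
    rw [if_neg, ih (fun c' hc' => hpre c' (List.mem_cons_of_mem c0 hc'))]
    intro hsw
    exact hpre c0 (by simp) ((PySem.Chars.startswith_iff _ _).mp hsw)

lemma pvScan_false (response : String) (answers cs : List String) :
    ∀ (l : List Nat), (∀ i ∈ l, pvFindChoiceAt response cs i = none) →
    pvScanPos response answers cs l = false := by
  intro l
  induction l with
  | nil => intro _; rfl
  | cons i t ih =>
    intro h
    simp only [pvScanPos]
    rw [h i (by simp)]
    exact ih (fun i' hi' => h i' (List.mem_cons_of_mem i hi'))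

lemma pvScan_hit (response : String) (answers cs : List String) (k : Nat) (c : String)
    (hnone : ∀ i, i < k → pvFindChoiceAt response cs i = none)
    (hk : pvFindChoiceAt response cs k = some c) :
    ∀ (m j : Nat), j ≤ k → k < j + m →
    pvScanPos response answers cs (List.range' j m) = answers.contains c := by
  intro m
  induction m with
  | zero => intro j _ h2; omega
  | succ m ih =>
    intro j h1 h2
    rw [List.range'_succ]
    simp only [pvScanPos]
    by_cases hjk : j = k
    · subst hjk; rw [hk]
    · rw [hnone j (by omega)]
      exact ih (j + 1) (by omega) (by omega)

-- ===== VERDICT (by name: the statement is the Claim_ definition above) =====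
theorem eval_response_spec : Claim_equal_eval_response := by
  intro response answers all_choices _
  unfold Spec_eval_response
  rw [pvA_eq_best]
  unfold eval_response_alt
  cases hf : all_choices.foldl (pvStepB response) none with
  | none =>
    obtain ⟨_, hall⟩ := pvBest_none response all_choices none hf
    rw [pvScan_false]
    intro i _
    apply pvFindAt_none
    intro c hc hpref
    have := (pvPrefix_find_le response c i hpref).1
    rw [hall c hc] at this
    exact Bool.false_ne_true this
  | some q =>
    rcases pvBest_split response all_choices none q hf with ⟨h1, _⟩ | ⟨pre, post, hsplit, hq, hfq, hpre, _, hpost⟩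
    · exact absurd h1 (by simp)
    · have hnn : (0 : Int) ≤ q.1 := by
        rw [← hfq, PySem.Str.find_eq]
        exact (PySem.Chars.find_nonneg_iff _ _).mpr ((PySem.Str.isIn_iff_infix q.2 response).mp hq)
      have hlen : q.1 ≤ (response.toList.length : Int) := by
        rw [← hfq, PySem.Str.find_eq]
        exact PySem.Chars.find_le_length _ _
      set k : Nat := q.1.toNat with hkdef
      have hmin : ∀ c ∈ all_choices, PySem.Str.isIn c response = true →
          q.1 ≤ PySem.Str.find response c := by
        intro c hc hin
        rw [hsplit] at hc
        rcases List.mem_append.mp hc with hc | hc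
        · exact le_of_lt (hpre c hc hin)
        · rcases List.mem_cons.mp hc with hc | hc
          · subst hc; rw [hfq]
          · exact hpost c hc hin
      have hnone : ∀ i, i < k → pvFindChoiceAt response all_choices i = none := by
        intro i hi
        apply pvFindAt_none
        intro c hc hpref
        obtain ⟨hin, hle⟩ := pvPrefix_find_le response c i hpref
        have := hmin c hc hin
        omega
      have hkhit : pvFindChoiceAt response all_choices k = some q.2 := by
        rw [hsplit]
        apply pvFindAt_first
        · intro c' hc' hpref
          obtain ⟨hin, hle⟩ := pvPrefix_find_le response c' k hpref
          have := hpre c' hc' hin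
          omega
        · have := pvFind_prefix response q.2 hq
          rw [hfq] at this
          exact this
      rw [List.range_eq_range']
      rw [pvScan_hit response answers all_choices k q.2 hnone hkhit (response.toList.length + 1) 0
        (by omega) (by omega)]
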